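-- pv_equiv track=rewrite | github.com/DanielDDDL/competitive-programming | problems/29.05.2017/cataratas.py | calcular_quantidade_balanceamento
-- ===== SOURCE A (Python) =====
-- def calcula_quantidade_maiores_menores(valor,valores_vazao):
--     maiores = 0
--     menores = 0
--     for i in range(len(valores_vazao)):
--         if (valor >= valores_vazao[i]):
--             maiores += 1
--         if (valor <= valores_vazao[i]):
--             menores += 1
--
--     #tirando o proprio valor
--     maiores -= 1
--     menores -= 1
--     return [maiores,menores]
--
-- def calcular_quantidade_balanceamento(valor_necessario, vasao_vigente):
--     maiorB = 0
--     for i in range(len(vasao_vigente)):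
--         consulta_aparicoes = calcula_quantidade_maiores_menores(vasao_vigente[i],vasao_vigente)
--         if (valor_necessario <= consulta_aparicoes[0] and valor_necessario <= consulta_aparicoes[1]):
--             if (vasao_vigente[i] > maiorB):
--                 maiorB = vasao_vigente[i]
--
--     return maiorB
-- ===== SOURCE B (Python) =====
-- def calcular_quantidade_balanceamento(valor_necessario, vasao_vigente):
--     s = sorted(vasao_vigente)
--     n = len(s)
--     best = 0
--     i = 0
--     while i < n:
--         v = s[i]
--         j = i + 1
--         while j < n and s[j] == v:
--             j += 1
--         # j - 1 = (# elements <= v) - 1,  n - i - 1 = (# elements >= v) - 1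
--         if valor_necessario <= j - 1 and valor_necessario <= n - i - 1 and v > best:
--             best = v
--         i = j
--     return best
-- ===== Notes on version B (the rewrite author's own statement) =====
-- stated objective: faster
-- what changed: Replaced the quadratic per-element rescan of the whole list by a single sort followed by one linear run-length scan over the sorted list, reading both counts off the run's start/end positions.
import Mathlib
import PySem

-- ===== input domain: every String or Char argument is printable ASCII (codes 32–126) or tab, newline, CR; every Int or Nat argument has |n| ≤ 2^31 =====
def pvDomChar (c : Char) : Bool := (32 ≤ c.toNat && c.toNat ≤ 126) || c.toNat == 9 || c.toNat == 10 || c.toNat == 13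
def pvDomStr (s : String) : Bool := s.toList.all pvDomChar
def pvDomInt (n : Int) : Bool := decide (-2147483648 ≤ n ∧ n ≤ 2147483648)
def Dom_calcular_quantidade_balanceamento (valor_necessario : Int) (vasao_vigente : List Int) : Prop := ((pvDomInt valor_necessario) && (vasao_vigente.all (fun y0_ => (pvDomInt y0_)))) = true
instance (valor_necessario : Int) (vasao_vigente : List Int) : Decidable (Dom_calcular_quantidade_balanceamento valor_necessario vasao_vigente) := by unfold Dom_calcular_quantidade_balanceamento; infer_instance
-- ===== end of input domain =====

-- B replaces A's quadratic per-element rescan by one sort plus a linear run-length scan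
-- over the sorted list (counts read off run positions); same return value on every input.

-- ===== PORT A =====
def calcula_quantidade_maiores_menores (valor : Int) (valores_vazao : List Int) : List Int :=
  -- the two counters (maiores, menores) over `for i in range(len(valores_vazao))`
  let mm := (PySem.List.pyRange 0 (valores_vazao.length : Int) 1).foldl
    (fun (mm : Int × Int) i =>
      (if PySem.List.pyGetD valores_vazao i 0 ≤ valor then mm.1 + 1 else mm.1,
       if valor ≤ PySem.List.pyGetD valores_vazao i 0 then mm.2 + 1 else mm.2)) (0, 0)
  [mm.1 - 1, mm.2 - 1]

def calcular_quantidade_balanceamento (valor_necessario : Int) (vasao_vigente : List Int) : Int :=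
  (PySem.List.pyRange 0 (vasao_vigente.length : Int) 1).foldl
    (fun maiorB i =>
      if valor_necessario ≤ PySem.List.pyGetD
           (calcula_quantidade_maiores_menores (PySem.List.pyGetD vasao_vigente i 0) vasao_vigente) 0 0 ∧
         valor_necessario ≤ PySem.List.pyGetD
           (calcula_quantidade_maiores_menores (PySem.List.pyGetD vasao_vigente i 0) vasao_vigente) 1 0 then
        (if maiorB < PySem.List.pyGetD vasao_vigente i 0 then PySem.List.pyGetD vasao_vigente i 0
         else maiorB)
      else maiorB) 0

-- ===== PORT B =====
-- the inner `while j < n and s[j] == v: j += 1`: length of the leading run of v, and the remainder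
def pvRun (v : Int) : List Int → Nat × List Int
  | [] => (0, [])
  | x :: xs => if x = v then ((pvRun v xs).1 + 1, (pvRun v xs).2) else (0, x :: xs)

theorem pvRun_snd_length_le (v : Int) (xs : List Int) : (pvRun v xs).2.length ≤ xs.length := by
  induction xs with
  | nil => simp [pvRun]
  | cons x xs ih =>
    simp only [pvRun]
    split
    · exact Nat.le_succ_of_le ih
    · simp

-- the outer `while i < n:` loop of B (i the current index, best the running answer)
def pvScan (va n : Int) (cur : List Int) (i best : Int) : Int :=
  match cur with
  | [] => best
  | v :: rest =>
    pvScan va n (pvRun v rest).2 (i + 1 + ((pvRun v rest).1 : Int))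
      (if va ≤ i + 1 + ((pvRun v rest).1 : Int) - 1 ∧ va ≤ n - i - 1 ∧ best < v then v else best)
termination_by cur.length
decreasing_by exact Nat.lt_succ_of_le (pvRun_snd_length_le v rest)

def calcular_quantidade_balanceamento_alt (valor_necessario : Int) (vasao_vigente : List Int) : Int :=
  let s := PySem.List.sorted vasao_vigente (fun x => x) false
  pvScan valor_necessario (s.length : Int) s 0 0

-- ===== PRECONDITION & SPEC =====
def Spec_calcular_quantidade_balanceamento (valor_necessario : Int) (vasao_vigente : List Int) (out : Int) : Prop := out = calcular_quantidade_balanceamento_alt valor_necessario vasao_vigente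
instance (valor_necessario : Int) (vasao_vigente : List Int) (out : Int) : Decidable (Spec_calcular_quantidade_balanceamento valor_necessario vasao_vigente out) := by unfold Spec_calcular_quantidade_balanceamento; infer_instance

-- ===== CLAIM (what is proved, stated in full; the proofs are below) =====
def Claim_equal_calcular_quantidade_balanceamento : Prop := ∀ (valor_necessario : Int) (vasao_vigente : List Int), Dom_calcular_quantidade_balanceamento valor_necessario vasao_vigente → Spec_calcular_quantidade_balanceamento valor_necessario vasao_vigente (calcular_quantidade_balanceamento valor_necessario vasao_vigente)

-- ===== LEMMAS AND PROOFS =====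

-- the common fold step both programs compute: keep the max of the qualifying values
-- (the test is A's: enough elements ≤ v and enough elements ≥ v, counted over s)
def pvG (va : Int) (s : List Int) (b v : Int) : Int :=
  if va ≤ (s.countP (fun x => decide (x ≤ v)) : Int) - 1 ∧
     va ≤ (s.countP (fun x => decide (v ≤ x)) : Int) - 1 then max b v else b

theorem pvG_right_comm (va : Int) (s : List Int) (b v w : Int) :
    pvG va s (pvG va s b v) w = pvG va s (pvG va s b w) v := by
  unfold pvG; split_ifs <;> first | rfl | exact sup_right_comm b v w

theorem foldl_pair_count (v : Int) (l : List Int) (a b : Int) :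
    l.foldl (fun (mm : Int × Int) x =>
        (if x ≤ v then mm.1 + 1 else mm.1, if v ≤ x then mm.2 + 1 else mm.2)) (a, b)
    = (a + (l.countP (fun x => decide (x ≤ v)) : Int),
       b + (l.countP (fun x => decide (v ≤ x)) : Int)) := by
  induction l generalizing a b with
  | nil => simp
  | cons x xs ih =>
    simp only [List.foldl_cons, ih, List.countP_cons, decide_eq_true_eq]
    split_ifs <;> simp <;> omega

theorem helper_eq (valor : Int) (l : List Int) :
    calcula_quantidade_maiores_menores valor l =
      [(l.countP (fun x => decide (x ≤ valor)) : Int) - 1,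
       (l.countP (fun x => decide (valor ≤ x)) : Int) - 1] := by
  show [((PySem.List.pyRange 0 (l.length : Int) 1).foldl
      (fun (mm : Int × Int) i =>
        (if PySem.List.pyGetD l i 0 ≤ valor then mm.1 + 1 else mm.1,
         if valor ≤ PySem.List.pyGetD l i 0 then mm.2 + 1 else mm.2)) (0, 0)).1 - 1,
    ((PySem.List.pyRange 0 (l.length : Int) 1).foldl
      (fun (mm : Int × Int) i =>
        (if PySem.List.pyGetD l i 0 ≤ valor then mm.1 + 1 else mm.1,
         if valor ≤ PySem.List.pyGetD l i 0 then mm.2 + 1 else mm.2)) (0, 0)).2 - 1] = _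
  rw [PySem.List.foldl_pyRange_zero_pyGetD' l 0
    (fun (mm : Int × Int) x => (if x ≤ valor then mm.1 + 1 else mm.1,
                                if valor ≤ x then mm.2 + 1 else mm.2)) (0, 0)]
  rw [foldl_pair_count]
  simp

theorem portA_eq_foldl (va : Int) (l : List Int) :
    calcular_quantidade_balanceamento va l = l.foldl (pvG va l) 0 := by
  unfold calcular_quantidade_balanceamento
  rw [PySem.List.foldl_pyRange_zero_pyGetD' l 0
    (fun (maiorB : Int) x =>
      if va ≤ PySem.List.pyGetD (calcula_quantidade_maiores_menores x l) 0 0 ∧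
         va ≤ PySem.List.pyGetD (calcula_quantidade_maiores_menores x l) 1 0 then
        (if maiorB < x then x else maiorB)
      else maiorB) 0]
  apply PySem.List.foldl_congr_mem
  intro b x _
  rw [helper_eq]
  simp only [PySem.List.pyGetD]
  norm_num
  unfold pvG
  split_ifs <;> first | rfl | omega

-- run-length decomposition: pvRun splits off the maximal leading run of v
theorem pvRun_decomp (v : Int) (xs : List Int) :
    xs = List.replicate (pvRun v xs).1 v ++ (pvRun v xs).2 := by
  induction xs with
  | nil => simp [pvRun]
  | cons x xs ih =>
    by_cases h : x = v
    · simp only [pvRun, if_pos h, List.replicate_succ, List.cons_append]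
      exact by rw [h, ← ih]
    · simp [pvRun, h]

theorem pvRun_head_ne (v : Int) (xs : List Int) (y : Int) (t : List Int)
    (h : (pvRun v xs).2 = y :: t) : y ≠ v := by
  induction xs with
  | nil => simp [pvRun] at h
  | cons x xs ih =>
    by_cases hx : x = v
    · simp only [pvRun, if_pos hx] at h; exact ih h
    · simp only [pvRun, if_neg hx] at h
      cases h; exact hx

-- every element after the run is strictly greater than v (for a sorted tail)
theorem pvRun_rest_gt (v : Int) (xs : List Int) (hs : xs.Pairwise (· ≤ ·))
    (hge : ∀ y ∈ xs, v ≤ y) : ∀ y ∈ (pvRun v xs).2, v < y := by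
  intro y hy
  have hdecomp := pvRun_decomp v xs
  rcases hr : (pvRun v xs).2 with _ | ⟨h0, t⟩
  · simp [hr] at hy
  · rw [hr] at hy
    have hh0 : h0 ∈ xs := by rw [hdecomp, hr]; exact List.mem_append_right _ (by simp)
    have hne : h0 ≠ v := pvRun_head_ne v xs h0 t hr
    have hvh0 : v < h0 := lt_of_le_of_ne (hge h0 hh0) (Ne.symm hne)
    rcases List.mem_cons.mp hy with heq | hy'
    · rw [heq]; exact hvh0
    · have hpr : ((pvRun v xs).2).Pairwise (· ≤ ·) := by
        rw [hdecomp] at hs; exact hs.sublist (List.sublist_append_right _ _)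
      rw [hr] at hpr
      exact lt_of_lt_of_le hvh0 ((List.pairwise_cons.mp hpr).1 y hy')

theorem foldl_pvG_replicate (va : Int) (s : List Int) (v b : Int) (c : Nat)
    (h : pvG va s b v = b) : (List.replicate c v).foldl (pvG va s) b = b := by
  induction c with
  | zero => rfl
  | succ n ih => simp only [List.replicate_succ, List.foldl_cons, h]; exact ih

theorem pvScan_eq_foldl (va : Int) (m : Nat) :
    ∀ (cur pre : List Int) (best : Int), cur.length ≤ m →
    (pre ++ cur).Pairwise (· ≤ ·) →
    (∀ x ∈ pre, ∀ y ∈ cur, x < y) →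
    pvScan va ((pre ++ cur).length : Int) cur (pre.length : Int) best
      = cur.foldl (pvG va (pre ++ cur)) best := by
  induction m with
  | zero =>
    intro cur pre best hlen _ _
    have hnil : cur = [] := List.eq_nil_of_length_eq_zero (Nat.le_zero.mp hlen)
    subst hnil; simp [pvScan]
  | succ m ih =>
    intro cur pre best hlen hsort hlt
    match cur with
    | [] => simp [pvScan]
    | v :: rest =>
      set s := pre ++ v :: rest with hsdef
      set c := (pvRun v rest).1 with hc
      set r := (pvRun v rest).2 with hr
      have hdecomp : rest = List.replicate c v ++ r := pvRun_decomp v rest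
      have hsortapp := List.pairwise_append.mp (hsdef ▸ hsort)
      have hvle : ∀ y ∈ rest, v ≤ y := (List.pairwise_cons.mp hsortapp.2.1).1
      have hrest_sorted : rest.Pairwise (· ≤ ·) := (List.pairwise_cons.mp hsortapp.2.1).2
      have hrgt : ∀ y ∈ r, v < y := pvRun_rest_gt v rest hrest_sorted hvle
      -- counts over s
      have hcntle : (s.countP (fun x => decide (x ≤ v)) : Int) = pre.length + 1 + c := by
        have h1 : pre.countP (fun x => decide (x ≤ v)) = pre.length :=
          List.countP_eq_length.mpr (fun x hx => by
            simp only [decide_eq_true_eq]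
            exact le_of_lt (hlt x hx v (by simp)))
        have h2 : r.countP (fun x => decide (x ≤ v)) = 0 :=
          List.countP_eq_zero.mpr (fun y hy => by
            simp only [decide_eq_true_eq]; exact not_le.mpr (hrgt y hy))
        rw [hsdef, List.countP_append, h1,
          show v :: rest = v :: (List.replicate c v ++ r) by rw [← hdecomp]]
        simp only [List.countP_cons, List.countP_append, List.countP_replicate, h2]
        simp; omega
      have hcntge : (s.countP (fun x => decide (v ≤ x)) : Int) = 1 + c + r.length := by
        have h1 : pre.countP (fun x => decide (v ≤ x)) = 0 :=
          List.countP_eq_zero.mpr (fun x hx => by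
            simp only [decide_eq_true_eq]; exact not_le.mpr (hlt x hx v (by simp)))
        have h2 : r.countP (fun x => decide (v ≤ x)) = r.length :=
          List.countP_eq_length.mpr (fun y hy => by
            simp only [decide_eq_true_eq]; exact le_of_lt (hrgt y hy))
        rw [hsdef, List.countP_append, h1,
          show v :: rest = v :: (List.replicate c v ++ r) by rw [← hdecomp]]
        simp only [List.countP_cons, List.countP_append, List.countP_replicate, h2]
        simp; omega
      have hslen : (s.length : Int) = pre.length + 1 + c + r.length := by
        rw [hsdef]; simp [hdecomp]; ring
      -- the step value equals pvG
      have hstep : (if va ≤ (pre.length : Int) + 1 + (c : Int) - 1 ∧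
            va ≤ (s.length : Int) - (pre.length : Int) - 1 ∧ best < v then v else best)
          = pvG va s best v := by
        unfold pvG
        simp only [hcntle, hcntge, hslen]
        split_ifs <;> first | rfl | omega
      -- absorb the run into one pvG application
      have habs : pvG va s (pvG va s best v) v = pvG va s best v := by
        unfold pvG; split_ifs <;> simp
      rw [pvScan]
      simp only [← hc, ← hr]
      rw [hstep]
      -- rewrite the fold over v :: rest
      have hfold : (v :: rest).foldl (pvG va s) best = r.foldl (pvG va s) (pvG va s best v) := by
        rw [show v :: rest = v :: (List.replicate c v ++ r) by rw [← hdecomp]]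
        simp only [List.foldl_cons, List.foldl_append]
        rw [foldl_pvG_replicate va s v (pvG va s best v) c habs]
      rw [hfold]
      -- apply the induction hypothesis with pre' = pre ++ v :: replicate c v
      have hs' : s = (pre ++ v :: List.replicate c v) ++ r := by
        rw [hsdef, hdecomp]; simp
      have hlen' : r.length ≤ m := by
        have h1 : r.length ≤ rest.length := hr ▸ pvRun_snd_length_le v rest
        have h2 : rest.length + 1 ≤ m + 1 := by simpa using hlen
        omega
      have hlt' : ∀ x ∈ pre ++ v :: List.replicate c v, ∀ y ∈ r, x < y := by
        intro x hx y hy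
        rcases List.mem_append.mp hx with hx | hx
        · exact lt_trans (hlt x hx v (by simp)) (hrgt y hy)
        · have hxv : x = v := by
            rcases List.mem_cons.mp hx with h | h
            · exact h
            · exact List.eq_of_mem_replicate h
          rw [hxv]; exact hrgt y hy
      have hsort' : ((pre ++ v :: List.replicate c v) ++ r).Pairwise (· ≤ ·) := by
        rw [← hs', hsdef]; exact hsdef ▸ hsort
      have hih := ih r (pre ++ v :: List.replicate c v) (pvG va s best v) hlen' hsort' hlt'
      rw [← hs'] at hih
      have hplen : ((pre ++ v :: List.replicate c v).length : Int)
          = (pre.length : Int) + 1 + (c : Int) := by simp; ring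
      rw [hplen] at hih
      exact hih

-- ===== VERDICT (by name: the statement is the Claim_ definition above) =====
theorem calcular_quantidade_balanceamento_spec : Claim_equal_calcular_quantidade_balanceamento := by
  intro va l _
  unfold Spec_calcular_quantidade_balanceamento
  unfold calcular_quantidade_balanceamento_alt
  set s := PySem.List.sorted l (fun x => x) false with hs
  have hperm : s.Perm l := PySem.List.sorted_perm l (fun x => x) false
  have hsort : s.Pairwise (· ≤ ·) := PySem.List.sorted_pairwise l (fun x => x)
  have hscan := pvScan_eq_foldl va s.length s [] 0 (le_refl _) (by simpa using hsort)
    (by intro x hx; simp at hx)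
  simp only [List.nil_append, List.length_nil, Nat.cast_zero] at hscan
  rw [hscan, portA_eq_foldl]
  have hg : pvG va l = pvG va s := by
    funext b v
    have h1 : l.countP (fun x => decide (x ≤ v)) = s.countP (fun x => decide (x ≤ v)) :=
      (hperm.countP_congr (fun x _ => rfl)).symm
    have h2 : l.countP (fun x => decide (v ≤ x)) = s.countP (fun x => decide (v ≤ x)) :=
      (hperm.countP_congr (fun x _ => rfl)).symm
    unfold pvG
    simp only [h1, h2]
  rw [hg]
  exact (@List.Perm.foldl_eq _ _ (pvG va s) l s ⟨fun b v w => pvG_right_comm va s b v w⟩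
    hperm.symm 0)
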